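-- pv_equiv track=rewrite | github.com/SumitaLamba/Ensemble-Classification-using-ECG-signals | Databalancing_SMOTE.py | _create_record_based_labels
-- ===== SOURCE A (Python) =====
-- def _create_record_based_labels(record_numbers):
--     """Create labels based on MIT-BIH record categories"""
--     labels = []
--     for record_num in record_numbers:
--         if record_num in [100, 101, 103, 105, 106, 107, 108, 109, 111, 112, 113, 114, 115, 116, 117, 118, 119]:
--             labels.append('Normal')  # Normal rhythms
--         elif record_num in [200, 201, 202, 203, 205, 207, 208, 209, 210, 212, 213, 214, 215]:
--             labels.append('Arrhythmia')  # Various arrhythmias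
--         elif record_num in [220, 221, 222, 223, 228, 230, 231, 232, 233, 234]:
--             labels.append('Abnormal')  # Other abnormalities
--         else:
--             labels.append('Other')
--
--     return labels
-- ===== SOURCE B (Python) =====
-- _GROUPS = [
--     ([100, 101, 103, 105, 106, 107, 108, 109, 111, 112, 113, 114, 115, 116, 117, 118, 119], 'Normal'),
--     ([200, 201, 202, 203, 205, 207, 208, 209, 210, 212, 213, 214, 215], 'Arrhythmia'),
--     ([220, 221, 222, 223, 228, 230, 231, 232, 233, 234], 'Abnormal'),
-- ]
--
--
-- def _create_record_based_labels(record_numbers):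
--     """Create labels based on MIT-BIH record categories.
--
--     Inverted traversal: index the input positions by record number once,
--     start from an all-'Other' output, then scatter each group's label into
--     the positions of that group's records."""
--     labels = ['Other'] * len(record_numbers)
--     positions = {}
--     for i, r in enumerate(record_numbers):
--         positions.setdefault(r, []).append(i)
--     for group, name in _GROUPS:
--         for r in group:
--             for i in positions.get(r, []):
--                 labels[i] = name
--     return labels
-- ===== Notes on version B (the rewrite author's own statement) =====
-- stated objective: alternative
-- what changed: Instead of classifying each element with a chain of membership tests, B indexes input positions by record number once, starts from an all-'Other' output, and scatters each group's label by iterating over the 40 constant records (inverted traversal).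
import Mathlib
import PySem

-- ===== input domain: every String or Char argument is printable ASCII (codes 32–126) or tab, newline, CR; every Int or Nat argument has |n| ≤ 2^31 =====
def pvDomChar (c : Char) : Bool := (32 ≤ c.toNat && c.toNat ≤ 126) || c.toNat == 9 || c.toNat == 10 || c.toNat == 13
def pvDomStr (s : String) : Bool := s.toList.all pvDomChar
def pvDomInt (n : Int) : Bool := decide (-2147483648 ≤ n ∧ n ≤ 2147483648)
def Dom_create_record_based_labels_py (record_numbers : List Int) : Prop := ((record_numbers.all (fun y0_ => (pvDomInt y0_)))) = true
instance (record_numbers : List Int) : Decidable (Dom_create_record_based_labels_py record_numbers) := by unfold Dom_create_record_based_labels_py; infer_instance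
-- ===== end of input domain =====

-- B inverts the traversal: it indexes input positions by record number once, starts from an all-'Other' output, and scatters each group's label over the positions of that group's records; same result, different traversal.

-- ===== PORT A =====
def create_record_based_labels_py (record_numbers : List Int) : List String :=
  record_numbers.foldl (fun labels record_num =>
    if record_num ∈ ([100, 101, 103, 105, 106, 107, 108, 109, 111, 112, 113, 114, 115, 116, 117, 118, 119] : List Int) then
      labels ++ ["Normal"]
    else if record_num ∈ ([200, 201, 202, 203, 205, 207, 208, 209, 210, 212, 213, 214, 215] : List Int) then
      labels ++ ["Arrhythmia"]
    else if record_num ∈ ([220, 221, 222, 223, 228, 230, 231, 232, 233, 234] : List Int) then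
      labels ++ ["Abnormal"]
    else
      labels ++ ["Other"]) []

-- ===== PORT B =====
-- the module-level constant _GROUPS
def recordGroups : List (List Int × String) :=
  [([100, 101, 103, 105, 106, 107, 108, 109, 111, 112, 113, 114, 115, 116, 117, 118, 119], "Normal"),
   ([200, 201, 202, 203, 205, 207, 208, 209, 210, 212, 213, 214, 215], "Arrhythmia"),
   ([220, 221, 222, 223, 228, 230, 231, 232, 233, 234], "Abnormal")]

-- positions.setdefault(r, []).append(i)  ==  insert r (getD r [] ++ [i])  (same key order, same lists)
def buildPositions (record_numbers : List Int) : PySem.Dict Int (List Int) :=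
  (PySem.List.enumerate record_numbers 0).foldl
    (fun d p => d.insert p.2 (d.getD p.2 [] ++ [p.1])) PySem.Dict.empty

def create_record_based_labels_py_alt (record_numbers : List Int) : List String :=
  let labels := List.replicate record_numbers.length "Other"
  let positions := buildPositions record_numbers
  recordGroups.foldl (fun labels gp =>
    gp.1.foldl (fun labels r =>
      (positions.getD r []).foldl (fun labels i => PySem.List.pySetD labels i gp.2) labels) labels) labels

-- ===== PRECONDITION & SPEC =====
def Spec_create_record_based_labels_py (record_numbers : List Int) (out : List String) : Prop := out = create_record_based_labels_py_alt record_numbers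
instance (record_numbers : List Int) (out : List String) : Decidable (Spec_create_record_based_labels_py record_numbers out) := by unfold Spec_create_record_based_labels_py; infer_instance

-- ===== CLAIM (what is proved, stated in full; the proofs are below) =====
def Claim_equal_create_record_based_labels_py : Prop := ∀ (record_numbers : List Int), Dom_create_record_based_labels_py record_numbers → Spec_create_record_based_labels_py record_numbers (create_record_based_labels_py record_numbers)

-- ===== LEMMAS AND PROOFS =====

-- the per-element label A computes
def labelA (r : Int) : String :=
  if r ∈ ([100, 101, 103, 105, 106, 107, 108, 109, 111, 112, 113, 114, 115, 116, 117, 118, 119] : List Int) then "Normal"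
  else if r ∈ ([200, 201, 202, 203, 205, 207, 208, 209, 210, 212, 213, 214, 215] : List Int) then "Arrhythmia"
  else if r ∈ ([220, 221, 222, 223, 228, 230, 231, 232, 233, 234] : List Int) then "Abnormal"
  else "Other"

lemma foldl_A_map (record_numbers : List Int) (acc : List String) :
    record_numbers.foldl (fun labels record_num =>
      if record_num ∈ ([100, 101, 103, 105, 106, 107, 108, 109, 111, 112, 113, 114, 115, 116, 117, 118, 119] : List Int) then
        labels ++ ["Normal"]
      else if record_num ∈ ([200, 201, 202, 203, 205, 207, 208, 209, 210, 212, 213, 214, 215] : List Int) then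
        labels ++ ["Arrhythmia"]
      else if record_num ∈ ([220, 221, 222, 223, 228, 230, 231, 232, 233, 234] : List Int) then
        labels ++ ["Abnormal"]
      else
        labels ++ ["Other"]) acc = acc ++ record_numbers.map labelA := by
  induction record_numbers generalizing acc with
  | nil => simp
  | cons r rs ih =>
    simp only [List.foldl_cons, List.map_cons, ih, labelA]
    split_ifs <;> simp

-- characterisation of the positions fold, generalised over the start dict
lemma posFold_getD (l : List (Int × Int)) (d : PySem.Dict Int (List Int)) (r : Int) :
    (l.foldl (fun d p => d.insert p.2 (d.getD p.2 [] ++ [p.1])) d).getD r []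
      = d.getD r [] ++ (l.filter (fun p => p.2 == r)).map (·.1) := by
  induction l generalizing d with
  | nil => simp
  | cons p l ih =>
    simp only [List.foldl_cons, ih, List.filter_cons]
    by_cases h : p.2 = r
    · subst h
      rw [PySem.Dict.getD_insert]
      simp
    · rw [PySem.Dict.getD_insert]
      simp [h, Ne.symm h]

lemma mem_positions_iff (record_numbers : List Int) (r i : Int) :
    i ∈ (buildPositions record_numbers).getD r []
      ↔ ∃ (k : Nat) (h : k < record_numbers.length), i = (k : Int) ∧ record_numbers[k] = r := by
  unfold buildPositions
  rw [posFold_getD]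
  simp only [PySem.Dict.getD_empty, List.nil_append, List.mem_map, List.mem_filter]
  constructor
  · rintro ⟨p, ⟨hp, hr⟩, hi⟩
    rw [PySem.List.mem_enumerate_iff] at hp
    obtain ⟨k, hk, rfl⟩ := hp
    exact ⟨k, hk, by simpa using hi.symm, by simpa using (beq_iff_eq.mp hr)⟩
  · rintro ⟨k, hk, rfl, hv⟩
    refine ⟨((k : Int), record_numbers[k]), ⟨?_, by simpa using hv⟩, rfl⟩
    rw [PySem.List.mem_enumerate_iff]
    exact ⟨k, hk, by simp⟩

-- getElem? through a fold of assignments over a (nonneg) index list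
lemma foldl_set_getElem? (idx : List Int) (name : String) (L : List String) (j : Nat)
    (hall : ∀ i ∈ idx, 0 ≤ i) :
    ((idx.foldl (fun L i => PySem.List.pySetD L i name) L))[j]?
      = if (j : Int) ∈ idx ∧ j < L.length then some name else L[j]? := by
  induction idx generalizing L with
  | nil => simp
  | cons i idx ih =>
    have hi : 0 ≤ i := hall i (by simp)
    simp only [List.foldl_cons]
    rw [ih _ (fun x hx => hall x (by simp [hx]))]
    rw [PySem.List.pySetD_of_nonneg _ _ hi]
    by_cases hj : (j : Int) ∈ idx
    · simp only [List.length_set, hj, true_and, List.mem_cons, or_true]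
      split_ifs with hL
      · rfl
      · rw [List.getElem?_eq_none (by simp; omega), List.getElem?_eq_none (by omega)]
    · by_cases he : (j : Int) = i
      · have hij : i.toNat = j := by omega
        rw [if_neg (show ¬((j : Int) ∈ idx ∧ j < (L.set i.toNat name).length) from by simp [hj]),
          List.getElem?_set, if_pos hij, hij]
        have hm : (j : Int) ∈ i :: idx := by simp [he]
        by_cases hL : j < L.length
        · rw [if_pos hL, if_pos ⟨hm, hL⟩]
        · rw [if_neg hL, if_neg (by tauto), List.getElem?_eq_none (by omega)]
      · have hne : i.toNat ≠ j := by omega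
        rw [List.getElem?_set]
        simp [List.mem_cons, he, hj, hne]

lemma length_foldl_set (idx : List Int) (name : String) (L : List String)
    (hall : ∀ i ∈ idx, 0 ≤ i) :
    ((idx.foldl (fun L i => PySem.List.pySetD L i name) L)).length = L.length := by
  induction idx generalizing L with
  | nil => rfl
  | cons i idx ih =>
    have hi : 0 ≤ i := hall i (by simp)
    simp only [List.foldl_cons]
    rw [ih _ (fun x hx => hall x (by simp [hx])), PySem.List.pySetD_of_nonneg _ _ hi,
      List.length_set]

lemma positions_nonneg (record_numbers : List Int) (r : Int) :
    ∀ i ∈ (buildPositions record_numbers).getD r [], 0 ≤ i := by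
  intro i hi
  rw [mem_positions_iff] at hi
  obtain ⟨k, _, rfl, _⟩ := hi
  exact Int.natCast_nonneg k

-- one group's scatter, seen at index j
lemma applyGroup_getElem? (record_numbers : List Int) (g : List Int) (name : String)
    (L : List String) (j : Nat) :
    ((g.foldl (fun labels r =>
        ((buildPositions record_numbers).getD r []).foldl
          (fun labels i => PySem.List.pySetD labels i name) labels) L))[j]?
      = if (∃ h : j < record_numbers.length, record_numbers[j] ∈ g) ∧ j < L.length
        then some name else L[j]? := by
  induction g generalizing L with
  | nil => simp
  | cons r g ih =>
    simp only [List.foldl_cons]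
    rw [ih]
    rw [length_foldl_set _ _ _ (positions_nonneg record_numbers r)]
    rw [foldl_set_getElem? _ _ _ _ (positions_nonneg record_numbers r)]
    by_cases hjn : j < record_numbers.length
    · by_cases hjL : j < L.length
      · simp only [hjn, hjL, and_true]
        by_cases hmem : record_numbers[j] ∈ g
        · simp [hmem]
        · simp only [List.mem_cons]
          by_cases hr : record_numbers[j] = r
          · have : (j : Int) ∈ (buildPositions record_numbers).getD r [] := by
              rw [mem_positions_iff]; exact ⟨j, hjn, rfl, hr⟩
            simp [hr, this]
          · have : (j : Int) ∉ (buildPositions record_numbers).getD r [] := by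
              rw [mem_positions_iff]
              rintro ⟨k, hk, hkj, hkr⟩
              have hkj' : k = j := by omega
              subst hkj'
              exact hr hkr
            simp [hmem, hr, this]
      · simp [hjL]
    · have : (j : Int) ∉ (buildPositions record_numbers).getD r [] := by
        rw [mem_positions_iff]
        rintro ⟨k, hk, hkj, hkr⟩
        omega
      simp [hjn, this]

lemma length_applyGroup (record_numbers : List Int) (g : List Int) (name : String)
    (L : List String) :
    ((g.foldl (fun labels r =>
        ((buildPositions record_numbers).getD r []).foldl
          (fun labels i => PySem.List.pySetD labels i name) labels) L)).length = L.length := by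
  induction g generalizing L with
  | nil => rfl
  | cons r g ih =>
    simp only [List.foldl_cons]
    rw [ih, length_foldl_set _ _ _ (positions_nonneg record_numbers r)]

-- disjointness of the three groups (finite checks)
lemma disj01 : ∀ r ∈ ([100, 101, 103, 105, 106, 107, 108, 109, 111, 112, 113, 114, 115, 116, 117, 118, 119] : List Int), r ∉ ([200, 201, 202, 203, 205, 207, 208, 209, 210, 212, 213, 214, 215] : List Int) := by decide
lemma disj02 : ∀ r ∈ ([100, 101, 103, 105, 106, 107, 108, 109, 111, 112, 113, 114, 115, 116, 117, 118, 119] : List Int), r ∉ ([220, 221, 222, 223, 228, 230, 231, 232, 233, 234] : List Int) := by decide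
lemma disj12 : ∀ r ∈ ([200, 201, 202, 203, 205, 207, 208, 209, 210, 212, 213, 214, 215] : List Int), r ∉ ([220, 221, 222, 223, 228, 230, 231, 232, 233, 234] : List Int) := by decide

-- ===== VERDICT (by name: the statement is the Claim_ definition above) =====
theorem create_record_based_labels_py_spec : Claim_equal_create_record_based_labels_py := by
  intro record_numbers _
  show create_record_based_labels_py record_numbers = create_record_based_labels_py_alt record_numbers
  unfold create_record_based_labels_py
  rw [foldl_A_map, List.nil_append]
  change _ = ([220, 221, 222, 223, 228, 230, 231, 232, 233, 234] : List Int).foldl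
    (fun labels r => ((buildPositions record_numbers).getD r []).foldl
      (fun labels i => PySem.List.pySetD labels i "Abnormal") labels)
    (([200, 201, 202, 203, 205, 207, 208, 209, 210, 212, 213, 214, 215] : List Int).foldl
      (fun labels r => ((buildPositions record_numbers).getD r []).foldl
        (fun labels i => PySem.List.pySetD labels i "Arrhythmia") labels)
      (([100, 101, 103, 105, 106, 107, 108, 109, 111, 112, 113, 114, 115, 116, 117, 118, 119] : List Int).foldl
        (fun labels r => ((buildPositions record_numbers).getD r []).foldl
          (fun labels i => PySem.List.pySetD labels i "Normal") labels)
        (List.replicate record_numbers.length "Other")))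
  apply List.ext_getElem?
  intro j
  rw [applyGroup_getElem?, applyGroup_getElem?, applyGroup_getElem?,
    length_applyGroup, length_applyGroup, List.length_replicate]
  by_cases hj : j < record_numbers.length
  · have hr : record_numbers[j]? = some record_numbers[j] := List.getElem?_eq_getElem hj
    rw [List.getElem?_map, hr]
    simp only [hj, and_true, exists_true_left, List.getElem?_replicate, labelA]
    by_cases h0 : record_numbers[j] ∈ ([100, 101, 103, 105, 106, 107, 108, 109, 111, 112, 113, 114, 115, 116, 117, 118, 119] : List Int)
    · simp [labelA, h0, disj01 _ h0, disj02 _ h0]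
    · by_cases h1 : record_numbers[j] ∈ ([200, 201, 202, 203, 205, 207, 208, 209, 210, 212, 213, 214, 215] : List Int)
      · simp [labelA, h0, h1, disj12 _ h1]
      · by_cases h2 : record_numbers[j] ∈ ([220, 221, 222, 223, 228, 230, 231, 232, 233, 234] : List Int)
        · simp [labelA, h0, h1, h2]
        · simp [labelA, h0, h1, h2]
  · simp [hj]
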